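-- pv_equiv track=rewrite | github.com/adw99/advent-of-code-2024 | Day 21/puzzle-21b.py | movey
-- ===== SOURCE A (Python) =====
-- def movey(start,target,ykey,avoid):
--     moves = ''
--     (sx,sy) = start
--     (_,ty) = target
--     while sy != ty:
--         sy += ykey[1]
--         moves += ykey[0]
--         if(sx,sy) == avoid:
--             return None
--     # dprint(f"movey: {start}, {target}, {ykey} --> {moves}")
--     return moves
-- ===== SOURCE B (Python) =====
-- def movey(start, target, ykey, avoid):
--     (sx, sy) = start
--     ty = target[1]
--     (s, d) = ykey
--     (ax, ay) = avoid
--     if sy == ty: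
--         return ''
--     n = (ty - sy) // d
--     if ax == sx and (ay - sy) % d == 0 and 1 <= (ay - sy) // d <= n:
--         return None
--     return s * n
-- ===== Notes on version B (the rewrite author's own statement) =====
-- stated objective: simpler
-- what changed: Replaces the step-by-step while loop and per-step string accumulation by a closed form: move count n = (ty-sy)//d, one divisibility/interval test deciding whether the avoid cell lies on the n traversed steps, and string repetition s*n; Pre_ excludes the inputs on which the step never reaches the target row - there A diverges except when the runaway loop happens to cross the avoid cell, and its None there is an artefact of that divergence.
-- outside the precondition, e.g. on movey((0, 2), (0, 0), ('v', 1), (0, 5)): A returns None, B returns ''; on movey((0, 0), (0, 3), ('v', 2), (0, 4)): A returns None, B returns 'v'; on movey((0, 0), (0, 2), ('v', 0), (0, 0)): A returns None, B raises ZeroDivisionError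
import Mathlib
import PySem

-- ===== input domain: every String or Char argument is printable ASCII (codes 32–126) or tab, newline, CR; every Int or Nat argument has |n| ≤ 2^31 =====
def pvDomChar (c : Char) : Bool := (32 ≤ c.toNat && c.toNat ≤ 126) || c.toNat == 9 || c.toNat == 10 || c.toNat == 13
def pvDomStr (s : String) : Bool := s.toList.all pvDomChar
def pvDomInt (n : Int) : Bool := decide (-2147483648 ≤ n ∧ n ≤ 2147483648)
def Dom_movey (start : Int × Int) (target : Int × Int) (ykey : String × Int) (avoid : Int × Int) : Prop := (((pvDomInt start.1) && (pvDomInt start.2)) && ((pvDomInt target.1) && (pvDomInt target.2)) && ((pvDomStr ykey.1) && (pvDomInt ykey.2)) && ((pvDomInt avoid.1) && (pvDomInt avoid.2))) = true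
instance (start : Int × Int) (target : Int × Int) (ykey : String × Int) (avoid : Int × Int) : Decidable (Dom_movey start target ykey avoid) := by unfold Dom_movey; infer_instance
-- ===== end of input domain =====

-- B replaces A's step-by-step while loop by a closed form: the move count n = (ty-sy)//d, one
-- divisibility/interval test for whether the avoid cell lies on the traversed segment, and string
-- repetition s*n (simpler, no loop).

-- ===== PORT A =====
-- A's while loop, as fuel recursion over the same state (sy, moves); the fuel chosen in `movey`
-- is enough for every input admitted by Pre_movey (outside Pre_ the Python loop need not return).
def moveyLoop (sx ty : Int) (s : List Char) (d ax ay : Int) : Nat → Int → List Char → Option (List Char)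
  | f, sy, moves =>
    if sy = ty then some moves
    else
      match f with
      | 0 => none  -- fuel exhausted: unreachable under Pre_movey
      | f' + 1 =>
        let sy' := sy + d
        let moves' := moves ++ s
        if sx = ax ∧ sy' = ay then none
        else moveyLoop sx ty s d ax ay f' sy' moves'

def movey (start : Int × Int) (target : Int × Int) (ykey : String × Int) (avoid : Int × Int) : Option String :=
  (moveyLoop start.1 target.2 ykey.1.toList ykey.2 avoid.1 avoid.2
      ((target.2 - start.2).natAbs + (avoid.2 - start.2).natAbs + 1) start.2 []).map String.ofList

-- ===== PORT B =====
def movey_alt (start : Int × Int) (target : Int × Int) (ykey : String × Int) (avoid : Int × Int) : Option String :=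
  let sx := start.1
  let sy := start.2
  let ty := target.2
  let s := ykey.1
  let d := ykey.2
  let ax := avoid.1
  let ay := avoid.2
  if sy = ty then some ""
  else
    let n := PySem.Int.floordiv (ty - sy) d
    if ax = sx ∧ PySem.Int.mod (ay - sy) d = 0 ∧ 1 ≤ PySem.Int.floordiv (ay - sy) d ∧
        PySem.Int.floordiv (ay - sy) d ≤ n then none
    else some (String.ofList (PySem.List.pyRepeat s.toList n))

-- ===== PRECONDITION & SPEC =====
-- Pre_ excludes exactly the inputs on which the step never reaches the target row (d does not
-- divide ty - sy, or points away from it): there the Python A diverges, except when the runaway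
-- loop happens to cross the avoid cell, where its None is an artefact of that divergence
-- (see claim cites).
def Pre_movey (start : Int × Int) (target : Int × Int) (ykey : String × Int) (avoid : Int × Int) : Prop :=
  start.2 = target.2
    ∨ (ykey.2 ∣ (target.2 - start.2) ∧ start.2 ≠ target.2 ∧ Int.sign ykey.2 = Int.sign (target.2 - start.2))
instance (start : Int × Int) (target : Int × Int) (ykey : String × Int) (avoid : Int × Int) : Decidable (Pre_movey start target ykey avoid) := by unfold Pre_movey; infer_instance

def pvWitness_movey : (Int × Int) × (Int × Int) × (String × Int) × (Int × Int) :=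
  ((0, 0), (0, 3), ("v", 1), (1, 1))

def Spec_movey (start : Int × Int) (target : Int × Int) (ykey : String × Int) (avoid : Int × Int) (out : Option String) : Prop := out = movey_alt start target ykey avoid
instance (start : Int × Int) (target : Int × Int) (ykey : String × Int) (avoid : Int × Int) (out : Option String) : Decidable (Spec_movey start target ykey avoid out) := by unfold Spec_movey; infer_instance

-- ===== CLAIM (what is proved, stated in full; the proofs are below) =====
def Claim_equal_movey : Prop := ∀ (start : Int × Int) (target : Int × Int) (ykey : String × Int) (avoid : Int × Int), Dom_movey start target ykey avoid → Pre_movey start target ykey avoid → Spec_movey start target ykey avoid (movey start target ykey avoid)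

-- ===== LEMMAS AND PROOFS =====

-- exact division: Python's floor division agrees with Lean's `/` on exact multiples
theorem floordiv_of_dvd (x d : Int) (hd : d ≠ 0) (h : d ∣ x) :
    PySem.Int.floordiv x d = x / d := by
  have h0 : PySem.Int.mod x d = 0 := (PySem.Int.mod_eq_zero_iff_dvd x d).mpr h
  have h1 := PySem.Int.floordiv_mul_add_mod x d
  rw [h0, add_zero] at h1
  have h2 : x / d * d = x := Int.ediv_mul_cancel h
  exact mul_right_cancel₀ hd (h1.trans h2.symm)

-- the loop reaches the target after exactly m steps without meeting avoid
theorem loop_reach (sx ty : Int) (s : List Char) (d ax ay : Int)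
    (m : ℕ) : ∀ (f : ℕ) (sy : Int) (moves : List Char),
    d ≠ 0 → ty = sy + m * d → m ≤ f →
    (∀ k : ℕ, 1 ≤ k → k ≤ m → ¬(sx = ax ∧ sy + k * d = ay)) →
    moveyLoop sx ty s d ax ay f sy moves = some (moves ++ (List.replicate m s).flatten) := by
  induction m with
  | zero =>
    intro f sy moves _ hty _ _
    simp at hty
    rw [moveyLoop.eq_def]
    simp [hty]
  | succ m ih =>
    intro f sy moves hd hty hf hnohit
    have hne : sy ≠ ty := by
      intro h
      rw [← h] at hty
      have : ((m : Int) + 1) * d = 0 := by push_cast at hty ⊢; linarith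
      rcases mul_eq_zero.mp this with h1 | h1
      · have : (0:Int) < (m:Int) + 1 := by positivity
        omega
      · exact hd h1
    obtain ⟨f', rfl⟩ : ∃ f', f = f' + 1 := ⟨f - 1, by omega⟩
    rw [moveyLoop.eq_def]
    simp only [hne, if_false]
    have hnohit1 : ¬(sx = ax ∧ sy + d = ay) := by
      have := hnohit 1 le_rfl (by omega)
      simpa using this
    rw [if_neg hnohit1]
    have := ih f' (sy + d) (moves ++ s) hd
      (by push_cast at hty ⊢; linarith)
      (by omega)
      (by
        intro k hk1 hkm
        have := hnohit (k + 1) (by omega) (by omega)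
        intro ⟨ha, hb⟩
        apply this
        refine ⟨ha, ?_⟩
        push_cast at hb ⊢
        linarith)
    rw [this, List.replicate_succ, List.flatten_cons, List.append_assoc]

-- the loop meets the avoid cell at step k (the target is not reached earlier)
theorem loop_hit (sx ty : Int) (s : List Char) (d ax ay : Int)
    (k : ℕ) : ∀ (f : ℕ) (sy : Int) (moves : List Char),
    d ≠ 0 → 1 ≤ k → k ≤ f → sx = ax → ay = sy + k * d →
    (∀ j : ℕ, j < k → sy + j * d ≠ ty) →
    moveyLoop sx ty s d ax ay f sy moves = none := by
  induction k with
  | zero => omega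
  | succ k ih =>
    intro f sy moves hd _ hf hax hay hnoty
    have hne : sy ≠ ty := by
      have := hnoty 0 (by omega)
      simpa using this
    obtain ⟨f', rfl⟩ : ∃ f', f = f' + 1 := ⟨f - 1, by omega⟩
    rw [moveyLoop.eq_def]
    simp only [hne, if_false]
    by_cases hhit : sx = ax ∧ sy + d = ay
    · rw [if_pos hhit]
    · rw [if_neg hhit]
      have hk1 : 1 ≤ k := by
        rcases Nat.eq_zero_or_pos k with h | h
        · exfalso; apply hhit; exact ⟨hax, by rw [hay, h]; push_cast; ring⟩
        · exact h
      exact ih f' (sy + d) (moves ++ s) hd hk1 (by omega) hax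
        (by rw [hay]; push_cast; ring)
        (by
          intro j hj
          have := hnoty (j + 1) (by omega)
          intro h; apply this; rw [← h]; push_cast; ring)

-- an exact quotient is positive exactly when dividend and divisor have the same sign
theorem sign_quot (x d : Int) (hdvd : d ∣ x) (hx : x ≠ 0) (hs : Int.sign d = Int.sign x) :
    0 < x / d := by
  obtain ⟨q, rfl⟩ := hdvd
  have hd : d ≠ 0 := fun h => hx (by rw [h, zero_mul])
  rw [Int.mul_ediv_cancel_left _ hd]
  have hsd : Int.sign d ≠ 0 := by simpa [Int.sign_eq_zero_iff_zero] using hd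
  rw [Int.sign_mul] at hs
  have h1 : Int.sign q = 1 :=
    (mul_left_cancel₀ hsd (by rw [mul_one]; exact hs)).symm
  exact Int.sign_eq_one_iff_pos.mp h1

-- a Nat quotient is bounded by the absolute value of the dividend (|d| ≥ 1)
theorem quot_le_natAbs (q d x : Int) (hd : d ≠ 0) (h : q * d = x) (hq : 0 ≤ q) :
    q.toNat ≤ x.natAbs := by
  have h1 : q.natAbs * d.natAbs = x.natAbs := by
    rw [← Int.natAbs_mul, h]
  have h2 : 1 ≤ d.natAbs := by omega
  calc q.toNat = q.natAbs := by omega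
    _ ≤ q.natAbs * d.natAbs := Nat.le_mul_of_pos_right _ (by omega)
    _ = x.natAbs := h1

-- ===== VERDICT (by name: the statement is the Claim_ definition above) =====
theorem movey_spec : Claim_equal_movey := by
  intro start target ykey avoid _ hpre
  unfold Spec_movey
  obtain ⟨sx, sy⟩ := start
  obtain ⟨tx, ty⟩ := target
  obtain ⟨s, d⟩ := ykey
  obtain ⟨ax, ay⟩ := avoid
  simp only [Pre_movey] at hpre
  by_cases hst : sy = ty
  · -- target already reached: both return the empty string
    subst hst
    simp only [movey, movey_alt]
    rw [moveyLoop.eq_def]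
    simp
  · obtain ⟨hdvd, hne, hs⟩ : d ∣ (ty - sy) ∧ sy ≠ ty ∧ Int.sign d = Int.sign (ty - sy) := by
      rcases hpre with h | ⟨h1, h2, h3⟩
      · exact absurd h hst
      · exact ⟨h1, fun h => h2 h, h3⟩
    have hsub : ty - sy ≠ 0 := sub_ne_zero_of_ne (Ne.symm hne)
    have hd : d ≠ 0 := by rintro rfl; exact hsub (Int.zero_dvd.mp hdvd)
    have hqpos : 0 < (ty - sy) / d := sign_quot _ _ hdvd hsub hs
    have hqd : (ty - sy) / d * d = ty - sy := Int.ediv_mul_cancel hdvd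
    have hfd : PySem.Int.floordiv (ty - sy) d = (ty - sy) / d := floordiv_of_dvd _ _ hd hdvd
    have hmcast : (((ty - sy) / d).toNat : Int) = (ty - sy) / d := by omega
    by_cases hB : ax = sx ∧ d ∣ (ay - sy) ∧ 1 ≤ (ay - sy) / d ∧ (ay - sy) / d ≤ (ty - sy) / d
    · -- avoid is on the segment: both return none
      obtain ⟨hax, hdvda, hka1, hkaq⟩ := hB
      have hkd : (ay - sy) / d * d = ay - sy := Int.ediv_mul_cancel hdvda
      have hkcast : ((((ay - sy) / d).toNat : Int)) = (ay - sy) / d := by omega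
      have hA : movey (sx, sy) (tx, ty) (s, d) (ax, ay) = none := by
        simp only [movey]
        rw [loop_hit sx ty s.toList d ax ay ((ay - sy) / d).toNat _ _ _ hd
          (by omega)
          (by have := quot_le_natAbs ((ay - sy) / d) d (ay - sy) hd hkd (by omega); omega)
          hax.symm
          (by push_cast [hkcast]; linarith)
          ?_]
        · rfl
        · intro j hj h
          have hjd : (j : Int) * d = (ty - sy) / d * d := by rw [hqd]; linarith
          have hjq : (j : Int) = (ty - sy) / d := mul_right_cancel₀ hd hjd
          omega
      have hB' : movey_alt (sx, sy) (tx, ty) (s, d) (ax, ay) = none := by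
        simp only [movey_alt]
        rw [if_neg hst, if_pos]
        refine ⟨hax, (PySem.Int.mod_eq_zero_iff_dvd _ _).mpr hdvda, ?_, ?_⟩
        · rw [floordiv_of_dvd _ _ hd hdvda]; exact hka1
        · rw [floordiv_of_dvd _ _ hd hdvda, hfd]; exact hkaq
      rw [hA, hB']
    · -- avoid is off the segment: both return the repeated string
      have hA : movey (sx, sy) (tx, ty) (s, d) (ax, ay) =
          some (String.ofList (List.replicate ((ty - sy) / d).toNat s.toList).flatten) := by
        simp only [movey]
        rw [loop_reach sx ty s.toList d ax ay ((ty - sy) / d).toNat _ _ _ hd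
          (by push_cast [hmcast]; linarith)
          (by have := quot_le_natAbs ((ty - sy) / d) d (ty - sy) hd hqd (by omega); omega)
          ?_]
        · simp
        · intro k hk1 hkm hhit
          apply hB
          obtain ⟨hax, hkd⟩ := hhit
          have hdv : d ∣ (ay - sy) := ⟨k, by linarith [hkd]⟩
          have : (ay - sy) / d = (k : Int) := by
            rw [show ay - sy = (k : Int) * d by linarith, Int.mul_ediv_cancel _ hd]
          refine ⟨hax.symm, hdv, by omega, by omega⟩
      have hB' : movey_alt (sx, sy) (tx, ty) (s, d) (ax, ay) =
          some (String.ofList (PySem.List.pyRepeat s.toList (PySem.Int.floordiv (ty - sy) d))) := by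
        simp only [movey_alt]
        rw [if_neg hst, if_neg]
        intro ⟨hax, hmoda, hka1, hle⟩
        have hdvda : d ∣ (ay - sy) := (PySem.Int.mod_eq_zero_iff_dvd _ _).mp hmoda
        rw [floordiv_of_dvd _ _ hd hdvda] at hka1
        rw [floordiv_of_dvd _ _ hd hdvda, hfd] at hle
        exact hB ⟨hax, hdvda, hka1, hle⟩
      rw [hA, hB', hfd]
      simp [PySem.List.pyRepeat]
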